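-- pv_equiv track=rewrite | github.com/deznode/coding-standards | skills/coding-standards/scripts/detect_standards.py | compute_compliance
-- ===== SOURCE A (Python) =====
-- def compute_compliance(comparison):
--     """Compute compliance score from comparison results."""
--     total = 0
--     installed = 0
--     matching = 0
--
--     for category in ["rules", "configs", "hooks"]:
--         for entry in comparison.get(category, []):
--             if entry["status"] == "extra":
--                 continue  # Don't count extras against compliance
--             total += 1
--             if entry["status"] in ("match", "modified"):
--                 installed += 1
--             if entry["status"] == "match":
--                 matching += 1
--
--     score = round((installed / total) * 100) if total > 0 else 0
--
--     rules_entries = [e for e in comparison.get("rules", []) if e["status"] != "extra"]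
--     configs_entries = [e for e in comparison.get("configs", []) if e["status"] != "extra"]
--     hooks_entries = [e for e in comparison.get("hooks", []) if e["status"] != "extra"]
--
--     return {
--         "rules_installed": sum(1 for e in rules_entries if e["status"] in ("match", "modified")),
--         "rules_total": len(rules_entries),
--         "rules_matching": sum(1 for e in rules_entries if e["status"] == "match"),
--         "configs_installed": sum(1 for e in configs_entries if e["status"] in ("match", "modified")),
--         "configs_total": len(configs_entries),
--         "configs_matching": sum(1 for e in configs_entries if e["status"] == "match"),
--         "hooks_installed": sum(1 for e in hooks_entries if e["status"] in ("match", "modified")),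
--         "hooks_total": len(hooks_entries),
--         "hooks_matching": sum(1 for e in hooks_entries if e["status"] == "match"),
--         "total_installed": installed,
--         "total": total,
--         "total_matching": matching,
--         "score_percent": score,
--     }
-- ===== SOURCE B (Python) =====
-- def compute_compliance(comparison):
--     """Compute compliance score from comparison results (single pass per category)."""
--     def tally(entries):
--         inst = tot = mat = 0
--         for e in entries:
--             s = e["status"]
--             if s != "extra":
--                 tot += 1
--                 if s == "match" or s == "modified":
--                     inst += 1
--                 if s == "match":
--                     mat += 1
--         return inst, tot, mat
--
--     ri, rt, rm = tally(comparison.get("rules", []))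
--     ci, ct, cm = tally(comparison.get("configs", []))
--     hi, ht, hm = tally(comparison.get("hooks", []))
--     installed = ri + ci + hi
--     total = rt + ct + ht
--     matching = rm + cm + hm
--     score = round((installed / total) * 100) if total > 0 else 0
--
--     return {
--         "rules_installed": ri,
--         "rules_total": rt,
--         "rules_matching": rm,
--         "configs_installed": ci,
--         "configs_total": ct,
--         "configs_matching": cm,
--         "hooks_installed": hi,
--         "hooks_total": ht,
--         "hooks_matching": hm,
--         "total_installed": installed,
--         "total": total,
--         "total_matching": matching,
--         "score_percent": score,
--     }
-- ===== Notes on version B (the rewrite author's own statement) =====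
-- stated objective: simpler
-- what changed: B makes one tallying pass per category computing (installed, total, matching) and derives the overall totals and score by summing those three triples, replacing A's separate global counting loop plus three filter comprehensions each rescanned by three generator-sums.
import Mathlib
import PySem

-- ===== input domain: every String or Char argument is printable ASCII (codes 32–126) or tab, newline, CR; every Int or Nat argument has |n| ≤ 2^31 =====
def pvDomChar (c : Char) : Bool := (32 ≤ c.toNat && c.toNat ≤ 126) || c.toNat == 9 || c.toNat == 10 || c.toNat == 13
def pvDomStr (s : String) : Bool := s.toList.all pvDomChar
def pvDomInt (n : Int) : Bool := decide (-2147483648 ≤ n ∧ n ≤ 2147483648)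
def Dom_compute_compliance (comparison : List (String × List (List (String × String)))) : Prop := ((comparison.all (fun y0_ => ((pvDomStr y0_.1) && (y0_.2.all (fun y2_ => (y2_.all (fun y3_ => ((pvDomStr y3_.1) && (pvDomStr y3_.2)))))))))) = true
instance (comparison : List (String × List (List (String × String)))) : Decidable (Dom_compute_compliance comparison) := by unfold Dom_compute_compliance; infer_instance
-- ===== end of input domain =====

-- One honest line: B tallies each category in a single pass and sums the three
-- per-category triples for the totals and the score, instead of A's separate
-- global counting loop plus three filtered lists each rescanned by generator sums.

-- ===== shared helpers (used verbatim by both ports) =====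

-- entry["status"] (first-match dict lookup); Pre_ guarantees the key is present,
-- so the "" default is never consulted on admitted inputs (Python raises KeyError there).
def ccStatus (e : List (String × String)) : String :=
  (PySem.Dict.get? (PySem.Dict.mk e) "status").getD ""

-- round half to even of p/q for naturals, q > 0 (the tie rule of Python's round())
def ccRHE (p q : Nat) : Nat :=
  let m := p / q
  let r := p % q
  if 2 * r > q || (2 * r == q && m % 2 == 1) then m + 1 else m

-- nearest IEEE-754 double of the positive rational num/den, as (mantissa, exponent)
-- with value m * 2^e, 2^52 ≤ m < 2^53 (normal range; exact for the ratios occurring here)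
def ccDbl (num den : Nat) : Nat × Int :=
  let e1 : Int := ((PySem.Int.bitLength num : Nat) : Int) - ((PySem.Int.bitLength den : Nat) : Int) - 53
  let p : Nat := if e1 < 0 then num * 2 ^ (-e1).toNat else num
  let q : Nat := if e1 < 0 then den else den * 2 ^ e1.toNat
  let adj := if p ≥ 2 ^ 53 * q then (p, 2 * q, e1 + 1) else (p, q, e1)
  let m := ccRHE adj.1 adj.2.1
  if m = 2 ^ 53 then (2 ^ 52, adj.2.2 + 1) else (m, adj.2.2)

-- Python's round((installed / total) * 100) for 0 ≤ installed, 0 < total: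
-- hand-ported exactly as CPython computes it — round to double twice (the division,
-- then the product by 100), then round-half-even to an integer.
def ccRound100 (installed total : Int) : Int :=
  let i := installed.toNat
  let t := total.toNat
  if i = 0 then 0
  else
    let d1 := ccDbl i t
    let d2 := if d1.2 ≥ 0 then ccDbl (d1.1 * 100 * 2 ^ d1.2.toNat) 1
              else ccDbl (d1.1 * 100) (2 ^ (-d1.2).toNat)
    if d2.2 ≥ 0 then ((d2.1 * 2 ^ d2.2.toNat : Nat) : Int)
    else ((ccRHE d2.1 (2 ^ (-d2.2).toNat) : Nat) : Int)

-- ===== PORT A =====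
def compute_compliance (comparison : List (String × List (List (String × String)))) : List (String × Int) :=
  let tim : Int × Int × Int :=
    ["rules", "configs", "hooks"].foldl (fun acc category =>
      (PySem.Dict.getD (PySem.Dict.mk comparison) category []).foldl
        (fun (a : Int × Int × Int) entry =>
          let s := ccStatus entry
          if s == "extra" then a
          else (a.1 + 1,
                a.2.1 + (if s == "match" || s == "modified" then 1 else 0),
                a.2.2 + (if s == "match" then 1 else 0))) acc) (0, 0, 0)
  let total := tim.1
  let installed := tim.2.1
  let matching := tim.2.2
  let score := if total > 0 then ccRound100 installed total else 0
  let rules_entries := (PySem.Dict.getD (PySem.Dict.mk comparison) "rules" []).filter (fun e => ccStatus e != "extra")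
  let configs_entries := (PySem.Dict.getD (PySem.Dict.mk comparison) "configs" []).filter (fun e => ccStatus e != "extra")
  let hooks_entries := (PySem.Dict.getD (PySem.Dict.mk comparison) "hooks" []).filter (fun e => ccStatus e != "extra")
  [("rules_installed", ((rules_entries.countP (fun e => ccStatus e == "match" || ccStatus e == "modified") : Nat) : Int)),
   ("rules_total", ((rules_entries.length : Nat) : Int)),
   ("rules_matching", ((rules_entries.countP (fun e => ccStatus e == "match") : Nat) : Int)),
   ("configs_installed", ((configs_entries.countP (fun e => ccStatus e == "match" || ccStatus e == "modified") : Nat) : Int)),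
   ("configs_total", ((configs_entries.length : Nat) : Int)),
   ("configs_matching", ((configs_entries.countP (fun e => ccStatus e == "match") : Nat) : Int)),
   ("hooks_installed", ((hooks_entries.countP (fun e => ccStatus e == "match" || ccStatus e == "modified") : Nat) : Int)),
   ("hooks_total", ((hooks_entries.length : Nat) : Int)),
   ("hooks_matching", ((hooks_entries.countP (fun e => ccStatus e == "match") : Nat) : Int)),
   ("total_installed", installed),
   ("total", total),
   ("total_matching", matching),
   ("score_percent", score)]

-- ===== PORT B =====
-- one pass over a category's entries: (installed, total, matching)
def ccTally (es : List (List (String × String))) : Int × Int × Int :=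
  es.foldl (fun (a : Int × Int × Int) e =>
    let s := ccStatus e
    if s != "extra" then
      (a.1 + (if s == "match" || s == "modified" then 1 else 0),
       a.2.1 + 1,
       a.2.2 + (if s == "match" then 1 else 0))
    else a) (0, 0, 0)

def compute_compliance_alt (comparison : List (String × List (List (String × String)))) : List (String × Int) :=
  let r := ccTally (PySem.Dict.getD (PySem.Dict.mk comparison) "rules" [])
  let c := ccTally (PySem.Dict.getD (PySem.Dict.mk comparison) "configs" [])
  let h := ccTally (PySem.Dict.getD (PySem.Dict.mk comparison) "hooks" [])
  let installed := r.1 + c.1 + h.1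
  let total := r.2.1 + c.2.1 + h.2.1
  let matching := r.2.2 + c.2.2 + h.2.2
  let score := if total > 0 then ccRound100 installed total else 0
  [("rules_installed", r.1), ("rules_total", r.2.1), ("rules_matching", r.2.2),
   ("configs_installed", c.1), ("configs_total", c.2.1), ("configs_matching", c.2.2),
   ("hooks_installed", h.1), ("hooks_total", h.2.1), ("hooks_matching", h.2.2),
   ("total_installed", installed),
   ("total", total),
   ("total_matching", matching),
   ("score_percent", score)]

-- ===== PRECONDITION & SPEC =====
-- Pre_ excludes inputs where some entry of the "rules"/"configs"/"hooks" categories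
-- lacks a "status" key: Python A raises KeyError there.
def Pre_compute_compliance (comparison : List (String × List (List (String × String)))) : Prop :=
  ∀ cat ∈ (["rules", "configs", "hooks"] : List String),
    ∀ e ∈ PySem.Dict.getD (PySem.Dict.mk comparison) cat [], "status" ∈ e.map Prod.fst

instance (comparison : List (String × List (List (String × String)))) : Decidable (Pre_compute_compliance comparison) := by
  unfold Pre_compute_compliance; infer_instance

def pvWitness_compute_compliance : (List (String × List (List (String × String)))) :=
  [("rules", [[("status", "match")], [("status", "missing")]]),
   ("configs", [[("status", "extra")], [("status", "modified")]])]

def Spec_compute_compliance (comparison : List (String × List (List (String × String)))) (out : List (String × Int)) : Prop := out = compute_compliance_alt comparison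
instance (comparison : List (String × List (List (String × String)))) (out : List (String × Int)) : Decidable (Spec_compute_compliance comparison out) := by unfold Spec_compute_compliance; infer_instance

-- ===== CLAIM (what is proved, stated in full; the proofs are below) =====
def Claim_equal_compute_compliance : Prop := ∀ (comparison : List (String × List (List (String × String)))), Dom_compute_compliance comparison → Pre_compute_compliance comparison → Spec_compute_compliance comparison (compute_compliance comparison)

-- ===== LEMMAS AND PROOFS =====

-- the three counting predicates, shared by the characterisations of both loops
def ccPInst (e : List (String × String)) : Bool := ccStatus e == "match" || ccStatus e == "modified"
def ccPTot (e : List (String × String)) : Bool := ccStatus e != "extra"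
def ccPMat (e : List (String × String)) : Bool := ccStatus e == "match"

lemma ccPInst_imp (e : List (String × String)) (h : ccPInst e = true) : ccPTot e = true := by
  simp only [ccPInst, Bool.or_eq_true, beq_iff_eq] at h
  simp only [ccPTot, bne_iff_ne, ne_eq]
  rcases h with h | h <;> simp [h]

lemma ccPMat_imp (e : List (String × String)) (h : ccPMat e = true) : ccPTot e = true := by
  simp only [ccPMat, beq_iff_eq] at h
  simp only [ccPTot, bne_iff_ne, ne_eq]
  simp [h]

-- B's one-pass tally computes the three counts
lemma ccTally_fold (es : List (List (String × String))) (x y z : Int) :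
    es.foldl (fun (a : Int × Int × Int) e =>
      let s := ccStatus e
      if s != "extra" then
        (a.1 + (if s == "match" || s == "modified" then 1 else 0),
         a.2.1 + 1,
         a.2.2 + (if s == "match" then 1 else 0))
      else a) (x, y, z)
    = (x + (es.countP ccPInst : Int), y + (es.countP ccPTot : Int), z + (es.countP ccPMat : Int)) := by
  induction es generalizing x y z with
  | nil => simp
  | cons e es ih =>
    simp only [List.foldl_cons, List.countP_cons]
    by_cases hx : ccStatus e = "extra"
    · have h1 : ccPInst e = false := by
        simp only [ccPInst, hx]; decide
      have h2 : ccPTot e = false := by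
        simp only [ccPTot, hx]; decide
      have h3 : ccPMat e = false := by
        simp only [ccPMat, hx]; decide
      simp only [hx, bne_self_eq_false, if_neg (by decide : ¬ (false = true))]
      rw [ih]
      simp [h1, h2, h3]
    · have h2 : ccPTot e = true := by simp [ccPTot, hx]
      rw [if_pos (by simpa [ccPTot] using h2)]
      rw [ih]
      simp only [ccPInst, ccPMat, h2]
      by_cases hm : ccStatus e = "match"
      · simp [hm, Prod.ext_iff] <;> omega
      · by_cases hmo : ccStatus e = "modified"
        · simp [hm, hmo, Prod.ext_iff] <;> omega
        · simp [hm, hmo, Prod.ext_iff] <;> omega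

lemma ccTally_eq (es : List (List (String × String))) :
    ccTally es = ((es.countP ccPInst : Int), (es.countP ccPTot : Int), (es.countP ccPMat : Int)) := by
  unfold ccTally
  rw [ccTally_fold]
  simp

-- A's global counting loop over one category advances the (total, installed, matching) state by the same counts
lemma ccALoop_fold (es : List (List (String × String))) (x y z : Int) :
    es.foldl (fun (a : Int × Int × Int) entry =>
      let s := ccStatus entry
      if s == "extra" then a
      else (a.1 + 1,
            a.2.1 + (if s == "match" || s == "modified" then 1 else 0),
            a.2.2 + (if s == "match" then 1 else 0))) (x, y, z)
    = (x + (es.countP ccPTot : Int), y + (es.countP ccPInst : Int), z + (es.countP ccPMat : Int)) := by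
  induction es generalizing x y z with
  | nil => simp
  | cons e es ih =>
    simp only [List.foldl_cons, List.countP_cons]
    by_cases hx : ccStatus e = "extra"
    · have h1 : ccPInst e = false := by simp only [ccPInst, hx]; decide
      have h2 : ccPTot e = false := by simp only [ccPTot, hx]; decide
      have h3 : ccPMat e = false := by simp only [ccPMat, hx]; decide
      simp only [hx, beq_self_eq_true, if_pos]
      rw [ih]
      simp [h1, h2, h3]
    · have h2 : ccPTot e = true := by simp [ccPTot, hx]
      rw [if_neg (by simpa using hx)]
      rw [ih]
      simp only [ccPInst, ccPMat, List.countP_cons, h2]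
      by_cases hm : ccStatus e = "match"
      · simp [hx, hm, Prod.ext_iff] <;> omega
      · by_cases hmo : ccStatus e = "modified"
        · simp [hx, hm, hmo, Prod.ext_iff] <;> omega
        · simp [hx, hm, hmo, Prod.ext_iff] <;> omega

-- A's filtered per-category recounts reduce to plain counts over the whole list
lemma ccCount_filter_inst (es : List (List (String × String))) :
    (es.filter ccPTot).countP ccPInst = es.countP ccPInst := by
  rw [List.countP_filter]
  apply List.countP_congr
  intro e _
  by_cases h : ccPInst e = true
  · simp [h, ccPInst_imp e h]
  · simp [Bool.not_eq_true] at h; simp [h]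

lemma ccCount_filter_mat (es : List (List (String × String))) :
    (es.filter ccPTot).countP ccPMat = es.countP ccPMat := by
  rw [List.countP_filter]
  apply List.countP_congr
  intro e _
  by_cases h : ccPMat e = true
  · simp [h, ccPMat_imp e h]
  · simp [Bool.not_eq_true] at h; simp [h]

lemma ccLen_filter (es : List (List (String × String))) :
    (es.filter ccPTot).length = es.countP ccPTot :=
  Eq.symm List.countP_eq_length_filter

-- ===== VERDICT (by name: the statement is the Claim_ definition above) =====
theorem compute_compliance_spec : Claim_equal_compute_compliance := by
  intro comparison _ _
  unfold Spec_compute_compliance compute_compliance compute_compliance_alt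
  simp only [List.foldl_cons, List.foldl_nil]
  rw [ccALoop_fold, ccALoop_fold, ccALoop_fold]
  rw [ccTally_eq, ccTally_eq, ccTally_eq]
  simp only [show (fun e => ccStatus e == "match" || ccStatus e == "modified") = ccPInst from rfl,
             show (fun e => ccStatus e != "extra") = ccPTot from rfl,
             show (fun e => ccStatus e == "match") = ccPMat from rfl,
             ccCount_filter_inst, ccCount_filter_mat, ccLen_filter, zero_add]
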